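-- pv_equiv track=rewrite | github.com/philomathtanya/Python-Programs | matrix_generation_multiplication.py | matrixGenMul
-- ===== SOURCE A (Python) =====
-- def matrixGenMul(firstValue, rows, columns):
--     a = []
--     b = []
--     r = []
--     for i in range(rows):
--         x = []
--         for j in range(columns):
--             x.append(firstValue)
--             firstValue += 1
--         a.append(x)
--     for i in range(columns):
--         b.append([a[j][i] for j in range(rows)])
--     for i in range(rows):
--         r.append([0]*rows)
--     for i in range(rows):
--         for j in range(rows):
--             r[i][j] = 0
--             for k in range(columns):
--                 r[i][j] += a[i][k]*b[k][j]
--     return r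
-- ===== SOURCE B (Python) =====
-- def matrixGenMul(firstValue, rows, columns):
--     c = max(columns, 0)
--     s1 = c * (c - 1) // 2
--     s2 = (c - 1) * c * (2 * c - 1) // 6
--     starts = [firstValue + i * c for i in range(rows)]
--     return [[c * u * v + (u + v) * s1 + s2 for v in starts] for u in starts]
-- ===== Notes on version B (the rewrite author's own statement) =====
-- stated objective: faster
-- what changed: B never materialises the matrix, its transpose or the O(rows^2*columns) dot-product loops: each cell of A·A^T is computed by the closed-form arithmetic-series sums Σk and Σk², so only the rows^2 output cells are computed.
import Mathlib
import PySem

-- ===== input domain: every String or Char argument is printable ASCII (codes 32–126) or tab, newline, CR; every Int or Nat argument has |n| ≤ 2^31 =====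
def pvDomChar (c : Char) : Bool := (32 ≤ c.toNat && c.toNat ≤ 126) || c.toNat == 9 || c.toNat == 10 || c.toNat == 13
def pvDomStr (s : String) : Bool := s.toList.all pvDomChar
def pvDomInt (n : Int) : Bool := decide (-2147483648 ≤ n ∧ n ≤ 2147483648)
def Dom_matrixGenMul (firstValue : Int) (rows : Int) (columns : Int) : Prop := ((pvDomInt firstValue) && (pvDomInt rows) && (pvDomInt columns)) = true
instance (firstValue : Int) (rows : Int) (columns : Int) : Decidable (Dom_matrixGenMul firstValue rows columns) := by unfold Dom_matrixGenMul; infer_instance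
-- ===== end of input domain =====

-- B replaces A's O(rows²·columns) dot-product loops by closed-form arithmetic-series sums (Σk, Σk²) per cell, O(rows²).

-- ===== PORT A =====
-- literal port of A: build a (consecutive ints, counter threaded), b = transpose via indexing,
-- then each r[i][j] starts at 0 and accumulates a[i][k]*b[k][j] over k
def matrixGenMul (firstValue : Int) (rows : Int) (columns : Int) : List (List Int) :=
  let st := (PySem.List.pyRange 0 rows 1).foldl
    (fun (st : List (List Int) × Int) _i =>
      let inner := (PySem.List.pyRange 0 columns 1).foldl
        (fun (st2 : List Int × Int) _j => (st2.1 ++ [st2.2], st2.2 + 1)) ([], st.2)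
      (st.1 ++ [inner.1], inner.2))
    ([], firstValue)
  let a := st.1
  let b := (PySem.List.pyRange 0 columns 1).foldl
    (fun bacc i => bacc ++ [(PySem.List.pyRange 0 rows 1).map
      (fun j => PySem.List.pyGetD (PySem.List.pyGetD a j []) i 0)]) []
  (PySem.List.pyRange 0 rows 1).map (fun i =>
    (PySem.List.pyRange 0 rows 1).map (fun j =>
      (PySem.List.pyRange 0 columns 1).foldl
        (fun acc k => acc + PySem.List.pyGetD (PySem.List.pyGetD a i []) k 0 *
                            PySem.List.pyGetD (PySem.List.pyGetD b k []) j 0) 0))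

-- ===== PORT B =====
def matrixGenMul_alt (firstValue : Int) (rows : Int) (columns : Int) : List (List Int) :=
  let c := max columns 0
  let s1 := PySem.Int.floordiv (c * (c - 1)) 2
  let s2 := PySem.Int.floordiv ((c - 1) * c * (2 * c - 1)) 6
  let starts := (PySem.List.pyRange 0 rows 1).map (fun i => firstValue + i * c)
  starts.map (fun u => starts.map (fun v => c * u * v + (u + v) * s1 + s2))

-- ===== PRECONDITION & SPEC =====
def Spec_matrixGenMul (firstValue : Int) (rows : Int) (columns : Int) (out : List (List Int)) : Prop := out = matrixGenMul_alt firstValue rows columns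
instance (firstValue : Int) (rows : Int) (columns : Int) (out : List (List Int)) : Decidable (Spec_matrixGenMul firstValue rows columns out) := by unfold Spec_matrixGenMul; infer_instance

-- ===== CLAIM (what is proved, stated in full; the proofs are below) =====
def Claim_equal_matrixGenMul : Prop := ∀ (firstValue : Int) (rows : Int) (columns : Int), Dom_matrixGenMul firstValue rows columns → Spec_matrixGenMul firstValue rows columns (matrixGenMul firstValue rows columns)

-- ===== LEMMAS AND PROOFS =====

-- triangular numbers and sums of squares, recursively
def pvTri : Nat → Int
  | 0 => 0
  | n + 1 => pvTri n + n

def pvSsq : Nat → Int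
  | 0 => 0
  | n + 1 => pvSsq n + n * n

-- the matrix a that A's first loop generates
def pvA (fv : Int) (r n : Nat) : List (List Int) :=
  (List.range r).map (fun (i : Nat) => (List.range n).map (fun (j : Nat) => fv + (i : Int) * (n : Int) + (j : Int)))

theorem pvTri_eq (n : Nat) : 2 * pvTri n = n * (n - 1 : Int) := by
  induction n with
  | zero => simp [pvTri]
  | succ n ih => simp only [pvTri]; push_cast; push_cast at ih; ring_nf; ring_nf at ih; omega

theorem pvSsq_eq (n : Nat) : 6 * pvSsq n = ((n : Int) - 1) * n * (2 * n - 1) := by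
  induction n with
  | zero => simp [pvSsq]
  | succ n ih => simp only [pvSsq]; push_cast; push_cast at ih; nlinarith [ih]

theorem pv_dot_closed (u v : Int) (n : Nat) :
    (List.range n).foldl (fun (acc : Int) (k : Nat) => acc + (u + (k : Int)) * (v + (k : Int))) 0
      = n * u * v + (u + v) * pvTri n + pvSsq n := by
  induction n with
  | zero => simp [pvTri, pvSsq]
  | succ n ih =>
    rw [List.range_succ, List.foldl_append, ih]
    simp only [List.foldl_cons, List.foldl_nil, pvTri, pvSsq]
    push_cast; ring

-- inner generation loop: the element is ignored, values count up from fv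
theorem pv_inner_loop {α : Type} (l : List α) (acc : List Int) (fv : Int) :
    l.foldl (fun (st2 : List Int × Int) _ => (st2.1 ++ [st2.2], st2.2 + 1)) (acc, fv)
      = (acc ++ (List.range l.length).map (fun (j : Nat) => fv + (j : Int)), fv + l.length) := by
  induction l generalizing acc fv with
  | nil => simp
  | cons x l ih =>
    simp only [List.foldl_cons, ih, List.length_cons]
    simp only [Prod.mk.injEq]
    constructor
    · rw [List.range_succ_eq_map]
      simp only [List.map_cons, List.map_map, List.append_assoc, List.append_cancel_left_eq,
        List.singleton_append]
      simp only [List.cons.injEq, Nat.cast_zero, add_zero, true_and]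
      exact List.map_congr_left (fun k _ => by simp [Function.comp]; ring)
    · push_cast; ring

theorem pvA_succ (fv : Int) (r n : Nat) :
    pvA fv (r + 1) n = (List.range n).map (fun (j : Nat) => fv + (j : Int)) :: pvA (fv + n) r n := by
  simp only [pvA, List.range_succ_eq_map, List.map_cons, List.map_map]
  refine congrArg₂ List.cons ?_ ?_
  · exact List.map_congr_left (fun j _ => by push_cast; ring)
  · exact List.map_congr_left (fun i _ => by
      simp only [Function.comp_apply]
      exact List.map_congr_left (fun j _ => by push_cast; ring))

-- outer generation loop of A, in the zeta-reduced shape the port leaves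
theorem pv_outer_loop (cols : Int) {α : Type} (l : List α) (acc : List (List Int)) (fv : Int) :
    l.foldl (fun (st : List (List Int) × Int) _ =>
        (st.1 ++ [((PySem.List.pyRange 0 cols 1).foldl
            (fun (st2 : List Int × Int) _ => (st2.1 ++ [st2.2], st2.2 + 1)) ([], st.2)).1],
         ((PySem.List.pyRange 0 cols 1).foldl
            (fun (st2 : List Int × Int) _ => (st2.1 ++ [st2.2], st2.2 + 1)) ([], st.2)).2))
      (acc, fv)
      = (acc ++ pvA fv l.length cols.toNat, fv + l.length * cols.toNat) := by
  induction l generalizing acc fv with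
  | nil => simp [pvA]
  | cons x l ih =>
    simp only [List.foldl_cons]
    rw [pv_inner_loop]
    dsimp only
    simp only [List.nil_append, PySem.List.length_pyRange_one, Int.sub_zero]
    rw [ih]
    simp only [Prod.mk.injEq, List.length_cons]
    constructor
    · rw [pvA_succ]
      simp only [List.append_assoc, List.singleton_append]
    · push_cast; ring

-- entries of the generated matrix
theorem pv_a_entry (fv : Int) (r n : Nat) (i k : Int) (hi0 : 0 ≤ i) (hir : i < (r : Int))
    (hk0 : 0 ≤ k) (hkn : k < (n : Int)) :
    PySem.List.pyGetD (PySem.List.pyGetD (pvA fv r n) i []) k 0 = fv + i * n + k := by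
  rw [PySem.List.pyGetD_eq_getElem _ [] hi0 (by simp [pvA]; omega)]
  simp only [pvA, List.getElem_map, List.getElem_range]
  rw [PySem.List.pyGetD_eq_getElem _ 0 hk0 (by simp; omega)]
  simp only [List.getElem_map, List.getElem_range]
  rw [Int.toNat_of_nonneg hi0, Int.toNat_of_nonneg hk0]

theorem matrixGenMul_spec' (f rows columns : Int) :
    matrixGenMul f rows columns = matrixGenMul_alt f rows columns := by
  simp only [matrixGenMul, matrixGenMul_alt]
  rw [pv_outer_loop]
  rw [PySem.List.foldl_append_singleton_eq_map]
  simp only [List.nil_append, PySem.List.length_pyRange_one, Int.sub_zero, List.map_map]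
  rw [← Int.toNat_eq_max]
  have h1 : PySem.Int.floordiv ((columns.toNat : Int) * ((columns.toNat : Int) - 1)) 2
      = pvTri columns.toNat := by
    rw [← pvTri_eq, PySem.Int.floordiv_eq_ediv_of_pos (by norm_num)]
    omega
  have h2 : PySem.Int.floordiv (((columns.toNat : Int) - 1) * (columns.toNat : Int) *
      (2 * (columns.toNat : Int) - 1)) 6 = pvSsq columns.toNat := by
    have := pvSsq_eq columns.toNat
    rw [show ((columns.toNat : Int) - 1) * (columns.toNat : Int) * (2 * (columns.toNat : Int) - 1)
        = 6 * pvSsq columns.toNat from (pvSsq_eq columns.toNat).symm,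
      PySem.Int.floordiv_eq_ediv_of_pos (by norm_num)]
    omega
  rw [h1, h2]
  refine List.map_congr_left (fun i hi => ?_)
  rw [PySem.List.mem_pyRange_one] at hi
  refine List.map_congr_left (fun j hj => ?_)
  rw [PySem.List.mem_pyRange_one] at hj
  -- the dot product of row i and row j of a, rewritten entrywise then closed form
  rw [PySem.List.foldl_congr_mem _ _
    (fun (acc : Int) (k : Int) => acc +
      (f + i * (columns.toNat : Int) + k) * (f + j * (columns.toNat : Int) + k)) 0
    (fun acc k hk => by
      rw [PySem.List.mem_pyRange_one] at hk
      rw [PySem.List.pyGetD_map_pyRange_of_nonneg _ columns k [] hk.1 hk.2,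
          PySem.List.pyGetD_map_pyRange_of_nonneg _ rows j 0 hj.1 hj.2,
          pv_a_entry f rows.toNat columns.toNat i k hi.1 (by omega) hk.1 (by omega),
          pv_a_entry f rows.toNat columns.toNat j k hj.1 (by omega) hk.1 (by omega)])]
  rw [PySem.List.pyRange_one 0 columns, List.foldl_map]
  simp only [zero_add, Int.sub_zero]
  rw [pv_dot_closed]
  simp only [Function.comp_apply]

-- ===== VERDICT (by name: the statement is the Claim_ definition above) =====
theorem matrixGenMul_spec : Claim_equal_matrixGenMul := by
  intro f rows columns _
  unfold Spec_matrixGenMul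
  exact matrixGenMul_spec' f rows columns
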